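-- pv_equiv track=rewrite | github.com/bky373/algorithm-solving | by-python/py-programmers/Lv2-조이스틱.py | count_min_step
-- ===== SOURCE A (Python) =====
-- def count_min_updown(alphabet, a_order, z_order):
--     return min(ord(alphabet) - a_order, z_order - ord(alphabet) + 1)
--
-- def count_min_step(name):
--     a_order, z_order = (ord('A'), ord('Z'))
--     prev = 0
--     step = 0
--
--     for i in range(len(name)):
--         alpha = name[i]
--
--         if alpha == 'A':
--             continue
--
--         step += count_min_updown(alpha, a_order, z_order)
--         step += i - prev
--         prev = i
--
--     return step
-- ===== SOURCE B (Python) =====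
-- def count_min_step(name):
--     # vertical cost of each non-'A' letter, plus horizontal cost = index of last non-'A' char
--     vert = sum(min(ord(c) - 65, 91 - ord(c)) for c in name if c != 'A')
--     for i, c in reversed(list(enumerate(name))):
--         if c != 'A':
--             return vert + i
--     return vert
-- ===== Notes on version B (the rewrite author's own statement) =====
-- stated objective: simpler
-- what changed: A's stateful prev/gap accumulation is replaced by two independent quantities: the sum of per-letter vertical costs and the index of the last non-'A' character (the telescoped horizontal cost), found by a backward scan.
import Mathlib
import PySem

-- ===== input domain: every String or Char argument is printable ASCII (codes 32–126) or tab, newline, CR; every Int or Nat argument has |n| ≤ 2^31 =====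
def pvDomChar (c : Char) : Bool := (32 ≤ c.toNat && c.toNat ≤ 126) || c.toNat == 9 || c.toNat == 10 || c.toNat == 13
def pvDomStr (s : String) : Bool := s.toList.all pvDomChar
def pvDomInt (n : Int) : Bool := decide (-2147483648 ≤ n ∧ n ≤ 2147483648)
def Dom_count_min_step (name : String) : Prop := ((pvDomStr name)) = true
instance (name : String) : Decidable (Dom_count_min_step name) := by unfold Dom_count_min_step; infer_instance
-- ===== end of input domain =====

-- B replaces A's stateful prev/gap bookkeeping by two independent quantities (the
-- per-letter vertical cost, and the index of the last non-'A' character): simpler.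

-- ===== PORT A =====
def count_min_updown (alphabet : Char) (a_order z_order : Int) : Int :=
  min ((alphabet.toNat : Int) - a_order) (z_order - (alphabet.toNat : Int) + 1)

def count_min_step (name : String) : Int :=
  let cs := name.toList
  let st := (List.range cs.length).foldl
    (fun (st : Int × Int) i =>
      let alpha := cs.getD i 'A'   -- name[i], i always in range
      if alpha = 'A' then st
      else ((i : Int), st.2 + count_min_updown alpha 65 90 + ((i : Int) - st.1)))
    (0, 0)
  st.2

-- ===== PORT B =====
-- the backward scan 'for i, c in reversed(list(enumerate(name))): if c != 'A': return vert + i'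
def lastNonA_ret : List (Int × Char) → Int → Int
  | [], vert => vert
  | (i, c) :: rest, vert => if c ≠ 'A' then vert + i else lastNonA_ret rest vert

def count_min_step_alt (name : String) : Int :=
  let cs := name.toList
  let vert := (cs.filter (fun c => c ≠ 'A')).foldl
    (fun s c => s + min ((c.toNat : Int) - 65) (91 - (c.toNat : Int))) 0
  lastNonA_ret (PySem.List.enumerate cs 0).reverse vert

-- ===== PRECONDITION & SPEC =====
def Spec_count_min_step (name : String) (out : Int) : Prop := out = count_min_step_alt name
instance (name : String) (out : Int) : Decidable (Spec_count_min_step name out) := by unfold Spec_count_min_step; infer_instance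

-- ===== CLAIM (what is proved, stated in full; the proofs are below) =====
def Claim_equal_count_min_step : Prop := ∀ (name : String), Dom_count_min_step name → Spec_count_min_step name (count_min_step name)

-- ===== LEMMAS AND PROOFS =====

-- shorthand used only by the proofs
def pvVert (cs : List Char) : Int :=
  (cs.filter (fun c => c ≠ 'A')).foldl
    (fun s c => s + min ((c.toNat : Int) - 65) (91 - (c.toNat : Int))) 0

def pvL (cs : List Char) : Int := lastNonA_ret (PySem.List.enumerate cs 0).reverse 0

lemma lastNonA_ret_shift (r : List (Int × Char)) (v : Int) :
    lastNonA_ret r v = v + lastNonA_ret r 0 := by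
  induction r with
  | nil => simp [lastNonA_ret]
  | cons p rest ih =>
    obtain ⟨i, c⟩ := p
    by_cases h : c = 'A' <;> simp [lastNonA_ret, h, ih]

lemma pvVert_append (cs : List Char) (c : Char) :
    pvVert (cs ++ [c]) =
      pvVert cs + (if c = 'A' then 0 else min ((c.toNat : Int) - 65) (91 - (c.toNat : Int))) := by
  by_cases h : c = 'A' <;>
    simp [pvVert, List.filter_append, List.foldl_append, h]

lemma pvL_append (cs : List Char) (c : Char) :
    pvL (cs ++ [c]) = if c = 'A' then pvL cs else (cs.length : Int) := by
  by_cases h : c = 'A' <;>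
    simp [pvL, PySem.List.enumerate_append, PySem.List.enumerate_cons,
      PySem.List.enumerate_nil, lastNonA_ret, h]

-- A's loop state after processing cs : (prev, step) = (pvL cs, pvVert cs + pvL cs)
lemma countA_invariant (cs : List Char) :
    (List.range cs.length).foldl
      (fun (st : Int × Int) i =>
        let alpha := cs.getD i 'A'
        if alpha = 'A' then st
        else ((i : Int), st.2 + count_min_updown alpha 65 90 + ((i : Int) - st.1)))
      (0, 0) = (pvL cs, pvVert cs + pvL cs) := by
  induction cs using List.reverseRecOn with
  | nil => simp [pvL, pvVert, lastNonA_ret, PySem.List.enumerate_nil]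
  | append_singleton cs c ih =>
    have hlen : (cs ++ [c]).length = cs.length + 1 := by simp
    rw [hlen, List.range_succ, List.foldl_append]
    have hcongr :
        (List.range cs.length).foldl
          (fun (st : Int × Int) i =>
            let alpha := (cs ++ [c]).getD i 'A'
            if alpha = 'A' then st
            else ((i : Int), st.2 + count_min_updown alpha 65 90 + ((i : Int) - st.1)))
          (0, 0) =
        (List.range cs.length).foldl
          (fun (st : Int × Int) i =>
            let alpha := cs.getD i 'A'
            if alpha = 'A' then st
            else ((i : Int), st.2 + count_min_updown alpha 65 90 + ((i : Int) - st.1)))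
          (0, 0) := by
      apply PySem.List.foldl_congr_mem
      intro st i hi
      have h : i < cs.length := List.mem_range.mp hi
      simp [List.getD, List.getElem?_append_left h]
    rw [hcongr, ih]
    have hget : (cs ++ [c]).getD cs.length 'A' = c := by
      simp [List.getD]
    by_cases h : c = 'A'
    · simp [List.foldl_cons, List.foldl_nil, h, pvL_append, pvVert_append]
    · simp only [List.foldl_cons, List.foldl_nil, hget, if_neg h,
        pvL_append, pvVert_append]
      simp [Prod.ext_iff, count_min_updown]
      omega


-- ===== VERDICT (by name: the statement is the Claim_ definition above) =====
theorem count_min_step_spec : Claim_equal_count_min_step := by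
  intro name _
  show count_min_step name = count_min_step_alt name
  simp only [count_min_step, count_min_step_alt, countA_invariant name.toList]
  rw [lastNonA_ret_shift]
  show pvVert name.toList + pvL name.toList = pvVert name.toList + pvL name.toList
  rfl
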